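-- pv_equiv track=rewrite | github.com/muhassannaeem/Cybersecurity-Project | backend/adaptive_deception/adaptive_deception.py | _estimate_skill_level
-- ===== SOURCE A (Python) =====
-- from typing import Dict, List, Optional, Tuple
--
-- def _estimate_skill_level(session: Dict) -> str:
--     """Estimate attacker skill level based on action patterns"""
--     try:
--         actions = list(session['actions'])
--         if len(actions) < 3:
--             return 'novice'
--
--         # Advanced patterns
--         advanced_actions = ['sql_injection', 'buffer_overflow', 'privilege_escalation',
--                           'lateral_movement', 'persistence_mechanism']
--
--         # Intermediate patterns
--         intermediate_actions = ['directory_traversal', 'password_attack', 'service_enumeration',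
--                               'vulnerability_scan']
--
--         # Count action types
--         advanced_count = sum(1 for action in actions if action in advanced_actions)
--         intermediate_count = sum(1 for action in actions if action in intermediate_actions)
--
--         if advanced_count >= 2:
--             return 'expert'
--         elif intermediate_count >= 3 or advanced_count >= 1:
--             return 'intermediate'
--         else:
--             return 'novice'
--
--     except Exception as e:
--         logger.error(f"Error estimating skill level: {e}")
--         return 'novice'
-- ===== SOURCE B (Python) =====
-- def _estimate_skill_level(session) -> str:
--     """Estimate attacker skill level: one pass with an early exit once 'expert' is decided."""
--     actions = list(session['actions'])
--     if len(actions) < 3: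
--         return 'novice'
--
--     ADVANCED = frozenset(('sql_injection', 'buffer_overflow', 'privilege_escalation',
--                           'lateral_movement', 'persistence_mechanism'))
--     INTERMEDIATE = frozenset(('directory_traversal', 'password_attack', 'service_enumeration',
--                               'vulnerability_scan'))
--
--     adv = 0
--     inter = 0
--     for a in actions:
--         if a in ADVANCED:
--             adv += 1
--             if adv == 2:
--                 return 'expert'  # early exit: the second advanced action already settles 'expert'
--         elif a in INTERMEDIATE:
--             inter += 1
--     return 'intermediate' if inter >= 3 or adv >= 1 else 'novice'
-- ===== Notes on version B (the rewrite author's own statement) =====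
-- stated objective: alternative
-- what changed: Replaces A's two staged counting passes followed by a threshold ladder with a single streaming pass keeping (adv, inter) accumulators that returns 'expert' early on the second advanced action (correct because the advanced count only grows), classifying each action once into disjoint categories; it also drops the try/except whose handler itself raises (logger is undefined).
import Mathlib
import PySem

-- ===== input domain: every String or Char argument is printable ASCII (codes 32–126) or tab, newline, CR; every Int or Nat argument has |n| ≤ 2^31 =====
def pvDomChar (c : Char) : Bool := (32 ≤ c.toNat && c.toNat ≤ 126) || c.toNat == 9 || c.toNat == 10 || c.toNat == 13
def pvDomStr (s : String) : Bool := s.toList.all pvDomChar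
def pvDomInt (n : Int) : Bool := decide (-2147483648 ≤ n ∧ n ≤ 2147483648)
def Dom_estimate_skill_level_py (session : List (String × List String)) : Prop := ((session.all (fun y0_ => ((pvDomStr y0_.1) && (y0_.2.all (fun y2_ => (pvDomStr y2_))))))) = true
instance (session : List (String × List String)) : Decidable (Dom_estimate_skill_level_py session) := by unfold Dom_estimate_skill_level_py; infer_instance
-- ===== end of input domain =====

-- B replaces A's two staged counting passes with a single streaming pass over the actions that
-- keeps (adv, inter) accumulators and returns 'expert' early on the second advanced action,
-- and drops A's try/except (whose handler itself raises: 'logger' undefined).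


def pvAdvanced : List String :=
  ["sql_injection", "buffer_overflow", "privilege_escalation",
   "lateral_movement", "persistence_mechanism"]

def pvIntermediate : List String :=
  ["directory_traversal", "password_attack", "service_enumeration",
   "vulnerability_scan"]

-- ===== PORT A =====
def estimate_skill_level_py (session : List (String × List String)) : String :=
  match (PySem.Dict.mk session).get? "actions" with
  | none => "novice"  -- unreachable under Pre_: Python's except handler itself raises NameError ('logger' undefined)
  | some actions =>
    if actions.length < 3 then "novice"
    else
      let advanced_count : Int :=
        actions.foldl (fun acc action => if pvAdvanced.contains action then acc + 1 else acc) 0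
      let intermediate_count : Int :=
        actions.foldl (fun acc action => if pvIntermediate.contains action then acc + 1 else acc) 0
      if 2 ≤ advanced_count then "expert"
      else if 3 ≤ intermediate_count ∨ 1 ≤ advanced_count then "intermediate"
      else "novice"

-- ===== PORT B =====
-- B's streaming loop: one pass, early return "expert" at the second advanced action.
def pvLoopB : List String → Int → Int → String
  | [], adv, inter => if 3 ≤ inter ∨ 1 ≤ adv then "intermediate" else "novice"
  | a :: rest, adv, inter =>
    if pvAdvanced.contains a then
      if adv + 1 == 2 then "expert" else pvLoopB rest (adv + 1) inter
    else if pvIntermediate.contains a then pvLoopB rest adv (inter + 1)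
    else pvLoopB rest adv inter

def estimate_skill_level_py_alt (session : List (String × List String)) : String :=
  match (PySem.Dict.mk session).get? "actions" with
  | none => ""  -- unreachable under Pre_: Python B raises KeyError here
  | some actions =>
    if actions.length < 3 then "novice"
    else pvLoopB actions 0 0

-- ===== PRECONDITION & SPEC =====
-- Pre_ excludes exactly the sessions without an 'actions' key: there Python A's except handler
-- raises NameError ('logger' is undefined), so A returns no value.
def Pre_estimate_skill_level_py (session : List (String × List String)) : Prop :=
  "actions" ∈ session.map Prod.fst
instance (session : List (String × List String)) : Decidable (Pre_estimate_skill_level_py session) := by unfold Pre_estimate_skill_level_py; infer_instance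

def pvWitness_estimate_skill_level_py : (List (String × List String)) :=
  [("actions", ["sql_injection", "nmap", "password_attack"])]

def Spec_estimate_skill_level_py (session : List (String × List String)) (out : String) : Prop := out = estimate_skill_level_py_alt session
instance (session : List (String × List String)) (out : String) : Decidable (Spec_estimate_skill_level_py session out) := by unfold Spec_estimate_skill_level_py; infer_instance

-- ===== CLAIM (what is proved, stated in full; the proofs are below) =====
def Claim_equal_estimate_skill_level_py : Prop := ∀ (session : List (String × List String)), Dom_estimate_skill_level_py session → Pre_estimate_skill_level_py session → Spec_estimate_skill_level_py session (estimate_skill_level_py session)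

-- ===== LEMMAS AND PROOFS =====

-- the two category lists are disjoint
theorem pvDisj (a : String) (h : pvAdvanced.contains a = true) :
    pvIntermediate.contains a = false := by
  simp [pvAdvanced] at h
  rcases h with h | h | h | h | h <;> subst h <;> decide

-- B's early-exit streaming loop computes A's full-count decision, as long as adv ≤ 1
theorem loopB_eq (xs : List String) : ∀ (adv inter : Int), 0 ≤ adv → adv ≤ 1 →
    pvLoopB xs adv inter =
      (if 2 ≤ adv + (xs.countP (fun a => pvAdvanced.contains a) : Int) then "expert"
       else if 3 ≤ inter + (xs.countP (fun a => pvIntermediate.contains a) : Int)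
              ∨ 1 ≤ adv + (xs.countP (fun a => pvAdvanced.contains a) : Int) then "intermediate"
       else "novice") := by
  induction xs with
  | nil =>
    intro adv inter h0 h1
    simp only [pvLoopB, List.countP_nil, Nat.cast_zero, add_zero]
    split_ifs <;> first | rfl | omega
  | cons a rest ih =>
    intro adv inter h0 h1
    rw [List.countP_cons, List.countP_cons]
    by_cases hA : pvAdvanced.contains a = true
    · have hI := pvDisj a hA
      simp only [pvLoopB, hA, hI, Bool.false_eq_true, if_true, if_false]
      by_cases h2 : adv = 1
      · subst h2
        rw [if_pos (by decide)]
        push_cast [hA, hI]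
        split_ifs <;> first | rfl | omega
      · have hadv : adv = 0 := by omega
        subst hadv
        rw [if_neg (by decide), show (0:Int) + 1 = 1 from by norm_num,
           ih 1 inter (by omega) (by omega)]
        push_cast [hA, hI]
        split_ifs <;> first | rfl | omega
    · have hA' : pvAdvanced.contains a = false := by
        exact Bool.not_eq_true _ ▸ eq_false_of_ne_true hA
      by_cases hI : pvIntermediate.contains a = true
      · simp only [pvLoopB, hA', hI, Bool.false_eq_true, if_true, if_false]
        rw [ih adv (inter + 1) h0 h1]
        push_cast [hA', hI]
        split_ifs <;> first | rfl | omega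
      · have hI' : pvIntermediate.contains a = false := by
          exact Bool.not_eq_true _ ▸ eq_false_of_ne_true hI
        simp only [pvLoopB, hA', hI', Bool.false_eq_true, if_false]
        rw [ih adv inter h0 h1]
        push_cast [hA', hI']
        split_ifs <;> first | rfl | omega

-- A's counting foldl is countP
theorem foldl_count (L : List String) (xs : List String) :
    xs.foldl (fun (acc : Int) action => if L.contains action then acc + 1 else acc) 0
      = (xs.countP (fun a => L.contains a) : Int) := by
  rw [PySem.List.foldl_ite_add_one (p := fun action => L.contains action = true)]
  simp

-- ===== VERDICT (by name: the statement is the Claim_ definition above) =====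
theorem estimate_skill_level_py_spec : Claim_equal_estimate_skill_level_py := by
  intro session _ hpre
  unfold Spec_estimate_skill_level_py estimate_skill_level_py estimate_skill_level_py_alt
  cases h : (PySem.Dict.mk session).get? "actions" with
  | none =>
    exact absurd hpre
      (by simpa [PySem.Dict.get?_eq_none_iff_not_mem_keys, Pre_estimate_skill_level_py] using h)
  | some actions =>
    by_cases hlen : actions.length < 3
    · simp [hlen]
    · simp only [hlen, if_false]
      rw [foldl_count, foldl_count, loopB_eq actions 0 0 (by omega) (by omega)]
      simp
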